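-- pv_equiv track=rewrite | github.com/rsoylu/sudoku | cs480_P02_A20465152.py | repeatsOrNot
-- ===== SOURCE A (Python) =====
-- def repeatsOrNot(table):
--     for i in table:
--         have = []
--         for j in i:
--             if j not in have:
--                 have.append(j)
--             else:
--                 return True
--     return False
-- ===== SOURCE B (Python) =====
-- def repeatsOrNot(table):
--     def sorted_has_dup(row):
--         s = sorted(row)
--         return any(a == b for a, b in zip(s, s[1:]))
--     return any(sorted_has_dup(row) for row in table)
-- ===== Notes on version B (the rewrite author's own statement) =====
-- stated objective: alternative
-- what changed: Replaces the incrementally-grown seen-list with per-row membership tests by sorting each row and scanning once for an adjacent equal pair (duplicates are adjacent in sorted order).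
import Mathlib
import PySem

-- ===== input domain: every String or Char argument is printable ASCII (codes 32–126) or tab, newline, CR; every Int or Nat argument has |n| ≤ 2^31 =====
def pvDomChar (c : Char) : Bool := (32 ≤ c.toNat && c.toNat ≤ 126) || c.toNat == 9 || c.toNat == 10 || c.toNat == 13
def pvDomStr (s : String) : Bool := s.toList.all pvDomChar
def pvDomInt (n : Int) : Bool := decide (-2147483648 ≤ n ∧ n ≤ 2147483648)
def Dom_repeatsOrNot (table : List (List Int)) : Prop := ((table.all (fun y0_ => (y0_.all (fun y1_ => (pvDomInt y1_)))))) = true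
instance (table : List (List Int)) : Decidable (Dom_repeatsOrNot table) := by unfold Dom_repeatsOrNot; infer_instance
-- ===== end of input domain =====

-- B sorts each row and scans once for an adjacent equal pair, instead of A's seen-list with membership tests (objective: alternative).

-- ===== PORT A =====
-- inner loop of A: walk the row with an incrementally grown 'have' list; returning true = A's early `return True`
def pvRowScan : List Int → List Int → Bool
  | [], _ => false
  | j :: rest, have_ =>
      if !(have_.contains j) then pvRowScan rest (have_ ++ [j]) else true

def repeatsOrNot : List (List Int) → Bool
  | [] => false
  | i :: rest => if pvRowScan i [] then true else repeatsOrNot rest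

-- ===== PORT B =====
-- sorted_has_dup: s = sorted(row); any(a == b for a, b in zip(s, s[1:]))
def pvSortedHasDup (row : List Int) : Bool :=
  let s := PySem.List.sorted row (fun x => x) false
  (s.zip s.tail).any (fun p => p.1 == p.2)

def repeatsOrNot_alt (table : List (List Int)) : Bool :=
  table.any (fun row => pvSortedHasDup row)

-- ===== PRECONDITION & SPEC =====
def Spec_repeatsOrNot (table : List (List Int)) (out : Bool) : Prop := out = repeatsOrNot_alt table
instance (table : List (List Int)) (out : Bool) : Decidable (Spec_repeatsOrNot table out) := by unfold Spec_repeatsOrNot; infer_instance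

-- ===== CLAIM (what is proved, stated in full; the proofs are below) =====
def Claim_equal_repeatsOrNot : Prop := ∀ (table : List (List Int)), Dom_repeatsOrNot table → Spec_repeatsOrNot table (repeatsOrNot table)

-- ===== LEMMAS AND PROOFS =====

-- A's inner scan returns true iff the row (prefixed by the distinct 'seen' list) has a duplicate
theorem pv_rowScan_eq (row : List Int) :
    ∀ seen : List Int, seen.Nodup → pvRowScan row seen = !decide ((seen ++ row).Nodup) := by
  induction row with
  | nil => intro seen h; simp [pvRowScan, h]
  | cons j rest ih =>
      intro seen h
      by_cases hj : j ∈ seen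
      · have hn : ¬ (seen ++ j :: rest).Nodup := by
          intro hnd
          exact List.disjoint_of_nodup_append hnd hj (List.mem_cons_self)
        simp [pvRowScan, hj, hn]
      · have h' : (seen ++ [j]).Nodup := by
          rw [List.nodup_append]
          refine ⟨h, List.nodup_singleton j, ?_⟩
          intro a ha b hb
          rw [List.mem_singleton] at hb
          subst hb
          exact fun he => hj (he ▸ ha)
        have hrec := ih (seen ++ [j]) h'
        simp only [pvRowScan, List.contains_eq_mem, hj, decide_false, Bool.not_false, if_true]
        rw [hrec, List.append_assoc]
        simp

-- a ≤-sorted list has an adjacent equal pair iff it is not Nodup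
theorem pv_adj (s : List Int) (hs : s.Pairwise (· ≤ ·)) :
    ((s.zip s.tail).any fun p => p.1 == p.2) = !decide s.Nodup := by
  induction s with
  | nil => simp
  | cons a t ih =>
      cases t with
      | nil => simp
      | cons b u =>
          have hle := List.pairwise_cons.mp hs
          by_cases hab : a = b
          · subst hab
            simp [List.zip]
          · have hlt : a < b := lt_of_le_of_ne (hle.1 b (by simp)) hab
            have hnot : a ∉ b :: u := by
              intro hmem
              rcases List.mem_cons.mp hmem with h | h
              · exact hab h
              · have : b ≤ a := (List.pairwise_cons.mp hle.2).1 a h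
                omega
            have habb : ((a == b) : Bool) = false := by simp [hab]
            show (((a, b) :: (b :: u).zip u).any fun p => p.1 == p.2) = _
            rw [List.any_cons, habb, Bool.false_or]
            have := ih hle.2
            simp only [List.tail_cons] at this
            rw [this]
            simp [List.nodup_cons, hnot]

-- B's per-row test equals "the row has a duplicate"
theorem pv_row_b (row : List Int) : pvSortedHasDup row = !decide row.Nodup := by
  unfold pvSortedHasDup
  have hperm := PySem.List.sorted_perm row (fun x => x) false
  have hs := PySem.List.sorted_pairwise row (fun x => x)
  simp only []
  rw [pv_adj _ hs]
  simp [hperm.nodup_iff]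

theorem pv_main (table : List (List Int)) : repeatsOrNot table = repeatsOrNot_alt table := by
  induction table with
  | nil => rfl
  | cons i rest ih =>
      show (if pvRowScan i [] then true else repeatsOrNot rest) = _
      have ha : pvRowScan i [] = pvSortedHasDup i := by
        rw [pv_rowScan_eq i [] List.nodup_nil, List.nil_append, pv_row_b]
      rw [ha, ih]
      by_cases h : pvSortedHasDup i
      · simp [repeatsOrNot_alt, h]
      · simp [repeatsOrNot_alt, h]

-- ===== VERDICT (by name: the statement is the Claim_ definition above) =====
theorem repeatsOrNot_spec : Claim_equal_repeatsOrNot := by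
  intro table _
  exact pv_main table
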